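-- pv_equiv track=rewrite | github.com/saharc2000/NLP_Construct-State_Classifier | Vectors.py | make_vector20
-- ===== SOURCE A (Python) =====
-- def find_dict_in_shift_from_smixut(sentence, shift, smixut):
--     i=0
--     punctuation = r"\"#$%&'()*+,-–./:;<=>?@[\]^_`{|}~"
--     for word_dict in sentence:
--         if (smixut in word_dict.get("word")) and (0 < i+shift < len(sentence)):
--             if(sentence[i+shift].get("word") in punctuation):
--                 if(shift > 0):
--                     return find_dict_in_shift_from_smixut(sentence, shift+1, smixut)
--                 else:
--                     return find_dict_in_shift_from_smixut(sentence, shift-1, smixut)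
--             else:
--                 return sentence[i+shift]
--         i+=1
--     return "err"
--
-- def get_unique_pos():
--     # Create a dictionary of unique POS tags with their corresponding index
--     unique_pos_tags = {
--         "NOUN": 0,  # Noun
--         "ADV": 1,  # Adverb
--         "NUM": 2,  # Numeral
--         "AUX": 3,  # Auxiliary Verb
--         "ADJ": 4,  # Adjective
--         "PUNCT": 5,  # Punctuation
--         "PROPN": 6,  # Proper Noun
--         "VERB": 7,  # Verb
--         "SCONJ": 8  # Subordinating Conjunction
--     }
--     return unique_pos_tags
--
-- def make_vector20(smixut_list, unique_lex_words, sentences):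
--     # Create a list to store the resulting vectors
--     combined_vectors = []
--     unique_pos_tags = get_unique_pos()
--
--     for i, smixut in enumerate(smixut_list):
--         if i >= len(sentences):
--             break
--
--         word1, word2 = smixut.split(' ', 1)
--
--         # Initialize the vector with zeros
--         vector = [0] * (len(unique_pos_tags) + len(unique_lex_words))
--
--         # Process the word before the smixut
--         word_before = find_dict_in_shift_from_smixut(sentences[i], -1, word1)
--         if word_before != "err":
--             pos_before = word_before.get("pos")
--             lex_before = word_before.get("lex")
--             if pos_before in unique_pos_tags:
--                 vector[unique_pos_tags[pos_before]] = 1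
--             if lex_before in unique_lex_words:
--                 vector[len(unique_pos_tags) + unique_lex_words[lex_before]] = 1
--
--         # Process the word after the smixut
--         word_after = find_dict_in_shift_from_smixut(sentences[i], 1, word2)
--         if word_after != "err":
--             pos_after = word_after.get("pos")
--             lex_after = word_after.get("lex")
--             if pos_after in unique_pos_tags:
--                 vector[unique_pos_tags[pos_after]] = 1
--             if lex_after in unique_lex_words:
--                 vector[len(unique_pos_tags) + unique_lex_words[lex_after]] = 1
--
--         # Append the vector to the list of vectors
--         combined_vectors.append(vector)
--
--     return combined_vectors
-- ===== SOURCE B (Python) =====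
-- def _find_shifted(sentence, shift, smixut):
--     # Precompute the indices whose word contains smixut once; then walk shift outward.
--     punctuation = r"\"#$%&'()*+,-–./:;<=>?@[\]^_`{|}~"
--     n = len(sentence)
--     matches = [i for i, wd in enumerate(sentence) if smixut in wd.get("word")]
--     while True:
--         i = next((i for i in matches if 0 < i + shift < n), None)
--         if i is None:
--             return "err"
--         cand = sentence[i + shift]
--         if cand.get("word") in punctuation:
--             shift += 1 if shift > 0 else -1
--         else:
--             return cand
--
-- POS_TAGS = {"NOUN": 0, "ADV": 1, "NUM": 2, "AUX": 3, "ADJ": 4,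
--             "PUNCT": 5, "PROPN": 6, "VERB": 7, "SCONJ": 8}
--
-- def _set_bits(vector, wd, unique_lex_words):
--     if wd != "err":
--         pos = wd.get("pos")
--         lex = wd.get("lex")
--         if pos in POS_TAGS:
--             vector[POS_TAGS[pos]] = 1
--         if lex in unique_lex_words:
--             vector[len(POS_TAGS) + unique_lex_words[lex]] = 1
--
-- def make_vector20(smixut_list, unique_lex_words, sentences):
--     vectors = []
--     for smixut, sentence in zip(smixut_list, sentences):
--         word1, word2 = smixut.split(' ', 1)
--         vector = [0] * (len(POS_TAGS) + len(unique_lex_words))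
--         for shift, word in ((-1, word1), (1, word2)):
--             _set_bits(vector, _find_shifted(sentence, shift, word), unique_lex_words)
--         vectors.append(vector)
--     return vectors
-- ===== Notes on version B (the rewrite author's own statement) =====
-- stated objective: alternative
-- what changed: The recursive helper that re-scans the whole sentence for substring matches on every shift step is replaced by a loop over a once-precomputed list of matching indices, and the enumerate+break outer loop by zip; the vector-filling blocks are factored into one shared helper folded over the two (shift, word) pairs.
import Mathlib
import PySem

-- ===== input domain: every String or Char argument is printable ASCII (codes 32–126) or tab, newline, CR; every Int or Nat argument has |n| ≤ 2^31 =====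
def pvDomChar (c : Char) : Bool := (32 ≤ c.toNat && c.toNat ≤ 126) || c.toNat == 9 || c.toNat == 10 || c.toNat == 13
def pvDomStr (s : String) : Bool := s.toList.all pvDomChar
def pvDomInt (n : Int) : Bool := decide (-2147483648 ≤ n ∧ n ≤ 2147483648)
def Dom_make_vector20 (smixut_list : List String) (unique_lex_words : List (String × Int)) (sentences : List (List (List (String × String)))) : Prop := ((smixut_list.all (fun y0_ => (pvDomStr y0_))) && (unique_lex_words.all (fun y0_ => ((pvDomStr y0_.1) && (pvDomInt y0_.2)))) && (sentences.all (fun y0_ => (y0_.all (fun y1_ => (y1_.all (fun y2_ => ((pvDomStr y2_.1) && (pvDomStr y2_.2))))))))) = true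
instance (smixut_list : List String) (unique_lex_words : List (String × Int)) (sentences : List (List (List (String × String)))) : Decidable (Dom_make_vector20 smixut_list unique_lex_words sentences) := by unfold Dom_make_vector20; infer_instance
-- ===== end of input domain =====

-- B replaces A's recursive helper (which re-scans the whole sentence for substring ms
-- on every shift step) by one precomputed match-index list walked per shift step, and the
-- enumerate+break outer loop by zip.

-- ===== PORT A =====
-- shared constants of both Python versions (the punctuation literal and the POS-tag dict)
def pvPunct : String := "\\\"#$%&'()*+,-–./:;<=>?@[\\]^_`{|}~"
def pvPosTags : PySem.Dict String Int :=
  PySem.Dict.ofList [("NOUN",0),("ADV",1),("NUM",2),("AUX",3),("ADJ",4),("PUNCT",5),("PROPN",6),("VERB",7),("SCONJ",8)]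
-- wd.get("word"); the "" default is never used under Pre_ (every word-dict has a "word" key)
def pvWordOf (wd : List (String × String)) : String :=
  ((PySem.Dict.ofList wd).get? "word").getD ""

-- A's 'for word_dict in sentence' scan with counter i: first i with (smixut in word ∧ 0 < i+shift < n)
def pvFirstHitA (rest : List (List (String × String))) (i : Nat) (n shift : Int) (smixut : String) : Option Nat :=
  match rest with
  | [] => none
  | wd :: t =>
      if PySem.Str.isIn smixut (pvWordOf wd) && decide (0 < (i : Int) + shift) && decide ((i : Int) + shift < n) then
        some i
      else pvFirstHitA t (i+1) n shift smixut

-- find_dict_in_shift_from_smixut; fuel is only a totality guard: each round grows |shift| by 1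
-- and no round can fire once |shift| ≥ len(sentence), so sentence.length + |shift| + 2 rounds always suffice
def pvFindAGo (fuel : Nat) (sentence : List (List (String × String))) (shift : Int) (smixut : String) :
    Option (List (String × String)) :=
  match fuel with
  | 0 => none
  | f + 1 =>
      match pvFirstHitA sentence 0 (sentence.length : Int) shift smixut with
      | none => none
      | some i =>
          let w := PySem.List.pyGetD sentence ((i : Int) + shift) []
          if PySem.Str.isIn (pvWordOf w) pvPunct then
            if 0 < shift then pvFindAGo f sentence (shift + 1) smixut
            else pvFindAGo f sentence (shift - 1) smixut
          else some w

def pvFindA (sentence : List (List (String × String))) (shift : Int) (smixut : String) :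
    Option (List (String × String)) :=
  pvFindAGo (sentence.length + shift.natAbs + 2) sentence shift smixut

-- the two 'if word_... != "err":' blocks of A, inlined per call site below
def pvMkA (ulw : List (String × Int)) (sents : List (List (List (String × String)))) (rest : List String) (i : Nat) :
    List (List Int) :=
  match rest with
  | [] => []
  | smixut :: t =>
      if sents.length ≤ i then []          -- 'if i >= len(sentences): break'
      else
        let parts := (PySem.Str.splitMax? smixut " " 1).getD []
        let word1 := parts.getD 0 ""
        let word2 := parts.getD 1 ""
        let lexD := PySem.Dict.ofList ulw
        let vector : List Int := List.replicate (pvPosTags.size + lexD.size) 0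
        let sentence := PySem.List.pyGetD sents (i : Int) []
        let v1 :=
          match pvFindA sentence (-1) word1 with
          | none => vector
          | some w =>
              let v' :=
                match (PySem.Dict.ofList w).get? "pos" with
                | some p => if pvPosTags.contains p then PySem.List.pySetD vector (pvPosTags.getD p 0) 1 else vector
                | none => vector
              match (PySem.Dict.ofList w).get? "lex" with
              | some lx => if lexD.contains lx then PySem.List.pySetD v' ((pvPosTags.size : Int) + lexD.getD lx 0) 1 else v'
              | none => v'
        let v2 :=
          match pvFindA sentence 1 word2 with
          | none => v1
          | some w =>
              let v' :=
                match (PySem.Dict.ofList w).get? "pos" with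
                | some p => if pvPosTags.contains p then PySem.List.pySetD v1 (pvPosTags.getD p 0) 1 else v1
                | none => v1
              match (PySem.Dict.ofList w).get? "lex" with
              | some lx => if lexD.contains lx then PySem.List.pySetD v' ((pvPosTags.size : Int) + lexD.getD lx 0) 1 else v'
              | none => v'
        v2 :: pvMkA ulw sents t (i+1)

def make_vector20 (smixut_list : List String) (unique_lex_words : List (String × Int)) (sentences : List (List (List (String × String)))) : List (List Int) :=
  pvMkA unique_lex_words sentences smixut_list 0

-- ===== PORT B =====
-- [i for i, wd in enumerate(sentence) if smixut in wd.get("word")]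
def pvMatchIdxs (rest : List (List (String × String))) (i : Nat) (smixut : String) : List Nat :=
  match rest with
  | [] => []
  | wd :: t =>
      if PySem.Str.isIn smixut (pvWordOf wd) then i :: pvMatchIdxs t (i+1) smixut
      else pvMatchIdxs t (i+1) smixut

-- the 'while True' loop of B's _find_shifted; same fuel totality guard as A's port
def pvFindLoopGo (fuel : Nat) (sentence : List (List (String × String))) (ms : List Nat) (n shift : Int) :
    Option (List (String × String)) :=
  match fuel with
  | 0 => none
  | f + 1 =>
      match ms.find? (fun (j : Nat) => decide (0 < (j : Int) + shift) && decide ((j : Int) + shift < n)) with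
      | none => none
      | some i =>
          let cand := PySem.List.pyGetD sentence ((i : Int) + shift) []
          if PySem.Str.isIn (pvWordOf cand) pvPunct then
            pvFindLoopGo f sentence ms n (if 0 < shift then shift + 1 else shift - 1)
          else some cand

def pvFindB (sentence : List (List (String × String))) (shift : Int) (smixut : String) :
    Option (List (String × String)) :=
  pvFindLoopGo (sentence.length + shift.natAbs + 2) sentence (pvMatchIdxs sentence 0 smixut) (sentence.length : Int) shift

-- _set_bits
def pvSetBits (lexD : PySem.Dict String Int) (vector : List Int) (wd : Option (List (String × String))) : List Int :=
  match wd with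
  | none => vector
  | some w =>
      let v' :=
        match (PySem.Dict.ofList w).get? "pos" with
        | some p => if pvPosTags.contains p then PySem.List.pySetD vector (pvPosTags.getD p 0) 1 else vector
        | none => vector
      match (PySem.Dict.ofList w).get? "lex" with
      | some lx => if lexD.contains lx then PySem.List.pySetD v' ((pvPosTags.size : Int) + lexD.getD lx 0) 1 else v'
      | none => v'

def make_vector20_alt (smixut_list : List String) (unique_lex_words : List (String × Int)) (sentences : List (List (List (String × String)))) : List (List Int) :=
  let lexD := PySem.Dict.ofList unique_lex_words
  (smixut_list.zip sentences).map (fun p =>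
    let parts := (PySem.Str.splitMax? p.1 " " 1).getD []
    let word1 := parts.getD 0 ""
    let word2 := parts.getD 1 ""
    let vector : List Int := List.replicate (pvPosTags.size + lexD.size) 0
    [((-1 : Int), word1), ((1 : Int), word2)].foldl (fun v q => pvSetBits lexD v (pvFindB p.2 q.1 q.2)) vector)

-- ===== PRECONDITION & SPEC =====
-- Pre_ excludes exactly the inputs where the Python raises or where B naturally raises while A
-- happens to return: (a) a smixut without a space among the first len(sentences) ones (A's tuple
-- unpack raises ValueError); (b) a visited sentence containing a word-dict without a "word" key
-- (None reaches 'in' → TypeError — in A only when the scan gets that far, in B always);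
-- (c) a lex entry whose key occurs as a "lex" value in a visited sentence but whose value is
-- not a valid Python index into the lex section of the vector (IndexError in A when that lex is
-- actually looked up; keys present but never selected by the shift walk are over-excluded).
def Pre_make_vector20 (smixut_list : List String) (unique_lex_words : List (String × Int)) (sentences : List (List (List (String × String)))) : Prop :=
  ((smixut_list.take sentences.length).all (fun s => PySem.Str.isIn " " s)
   && (sentences.take smixut_list.length).all (fun sent => sent.all (fun wd => (PySem.Dict.ofList wd).contains "word"))
   && (PySem.Dict.ofList unique_lex_words).items.all (fun p =>
        !((sentences.take smixut_list.length).flatMap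
            (fun sent => sent.filterMap (fun wd => (PySem.Dict.ofList wd).get? "lex"))).contains p.1
        || decide (PySem.Raise.InRange (9 + (PySem.Dict.ofList unique_lex_words).size) (9 + p.2)))) = true
instance (smixut_list : List String) (unique_lex_words : List (String × Int)) (sentences : List (List (List (String × String)))) : Decidable (Pre_make_vector20 smixut_list unique_lex_words sentences) := by unfold Pre_make_vector20; infer_instance

def pvWitness_make_vector20 : List String × (List (String × Int)) × (List (List (List (String × String)))) :=
  (["a b"], [("x", 0)], [[[("word","a"),("pos","NOUN")],[("word","b"),("lex","x")]]])

def Spec_make_vector20 (smixut_list : List String) (unique_lex_words : List (String × Int)) (sentences : List (List (List (String × String)))) (out : List (List Int)) : Prop := out = make_vector20_alt smixut_list unique_lex_words sentences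
instance (smixut_list : List String) (unique_lex_words : List (String × Int)) (sentences : List (List (List (String × String)))) (out : List (List Int)) : Decidable (Spec_make_vector20 smixut_list unique_lex_words sentences out) := by unfold Spec_make_vector20; infer_instance

-- ===== CLAIM (what is proved, stated in full; the proofs are below) =====
def Claim_equal_make_vector20 : Prop := ∀ (smixut_list : List String) (unique_lex_words : List (String × Int)) (sentences : List (List (List (String × String)))), Dom_make_vector20 smixut_list unique_lex_words sentences → Pre_make_vector20 smixut_list unique_lex_words sentences → Spec_make_vector20 smixut_list unique_lex_words sentences (make_vector20 smixut_list unique_lex_words sentences)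

-- ===== LEMMAS AND PROOFS =====

-- A's fused scan = B's precomputed match list filtered for the bounds condition
theorem pvFirstHitA_eq_find? (rest : List (List (String × String))) (i : Nat) (n shift : Int) (smixut : String) :
    pvFirstHitA rest i n shift smixut
      = (pvMatchIdxs rest i smixut).find? (fun (j : Nat) => decide (0 < (j : Int) + shift) && decide ((j : Int) + shift < n)) := by
  induction rest generalizing i with
  | nil => rfl
  | cons wd t ih =>
      simp only [pvFirstHitA, pvMatchIdxs, PySem.Str.isIn_eq]
      by_cases h : PySem.Chars.isIn smixut.toList (pvWordOf wd).toList = true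
      · by_cases h1 : (0 : Int) < (i : Int) + shift <;> by_cases h2 : (i : Int) + shift < n <;>
          simp [h, h1, h2, ih]
      · simp [h, ih]

theorem pvFindAGo_eq (fuel : Nat) (sentence : List (List (String × String))) (shift : Int) (smixut : String) :
    pvFindAGo fuel sentence shift smixut
      = pvFindLoopGo fuel sentence (pvMatchIdxs sentence 0 smixut) (sentence.length : Int) shift := by
  induction fuel generalizing shift with
  | zero => rfl
  | succ f ih =>
      simp only [pvFindAGo, pvFindLoopGo, pvFirstHitA_eq_find?]
      cases (pvMatchIdxs sentence 0 smixut).find?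
          (fun (j : Nat) => decide (0 < (j : Int) + shift) && decide ((j : Int) + shift < (sentence.length : Int))) with
      | none => rfl
      | some i =>
          simp only []
          split
          · by_cases hs : 0 < shift <;> simp [hs, ih]
          · rfl

theorem pvFindA_eq_pvFindB (sentence : List (List (String × String))) (shift : Int) (smixut : String) :
    pvFindA sentence shift smixut = pvFindB sentence shift smixut := by
  simp only [pvFindA, pvFindB, pvFindAGo_eq]

theorem pvMkA_eq (ulw : List (String × Int)) (sents : List (List (List (String × String)))) (rest : List String) (i : Nat) :
    pvMkA ulw sents rest i
      = (rest.zip (sents.drop i)).map (fun p =>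
          let lexD := PySem.Dict.ofList ulw
          let parts := (PySem.Str.splitMax? p.1 " " 1).getD []
          let word1 := parts.getD 0 ""
          let word2 := parts.getD 1 ""
          let vector : List Int := List.replicate (pvPosTags.size + lexD.size) 0
          [((-1 : Int), word1), ((1 : Int), word2)].foldl (fun v q => pvSetBits lexD v (pvFindB p.2 q.1 q.2)) vector) := by
  induction rest generalizing i with
  | nil => rfl
  | cons smixut t ih =>
      by_cases hle : sents.length ≤ i
      · simp [pvMkA, hle, List.drop_eq_nil_of_le hle]
      · rw [Nat.not_le] at hle
        rw [List.drop_eq_getElem_cons hle]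
        simp only [pvMkA, List.zip_cons_cons, List.map_cons, if_neg (by omega : ¬ sents.length ≤ i), ih]
        congr 1
        simp only [List.foldl_cons, List.foldl_nil, pvSetBits, pvFindA_eq_pvFindB,
          PySem.List.pyGetD_natCast, List.getD_eq_getElem?_getD, List.getElem?_eq_getElem hle,
          Option.getD_some]

theorem make_vector20_spec : Claim_equal_make_vector20 := by
  intro smixut_list unique_lex_words sentences _ _
  unfold Spec_make_vector20 make_vector20 make_vector20_alt
  simpa using pvMkA_eq unique_lex_words sentences smixut_list 0
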